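-- pv_equiv track=rewrite | github.com/AdamZhouSE/pythonHomework | Code/CodeRecords/2340/61097/283254.py | vol
-- ===== SOURCE A (Python) =====
-- def findmax(i,j,arr):
--     ans=arr[i]
--     loc=i
--     for k in range(i,j+1):
--         if(ans<arr[k]):
--             ans=arr[k]
--             loc=k
--     return loc
--
-- def vol(i,j,arr,bd):
--     if(i>=j): return 0
--     loc=findmax(i,j,arr)
--     if(loc<bd):
--         tmp=0
--         for k in range(loc+1,bd):
--             tmp+=arr[loc]-arr[k]
--         return tmp+vol(i,loc-1,arr,loc)
--     else:
--         tmp=0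
--         for k in range(bd+1,loc):
--             tmp+=arr[loc]-arr[k]
--         return tmp+vol(loc+1,j,arr,loc)
-- ===== SOURCE B (Python) =====
-- def vol(i, j, arr, bd):
--     if i >= j:
--         return 0
--     n = len(arr)
--     # prefix sums: P[t] = sum(arr[:t])
--     P = [0]
--     for v in arr:
--         P.append(P[-1] + v)
--     # sparse table: table[k][s] = (max value, leftmost argmax) of arr[s : s + 2**k]
--     table = [[(arr[s], s) for s in range(n)]]
--     length = 1
--     while 2 * length <= n:
--         prev = table[-1]
--         row = [prev[s] if prev[s][0] >= prev[s + length][0] else prev[s + length]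
--                for s in range(n - 2 * length + 1)]
--         table.append(row)
--         length *= 2
--     def query(a, b):
--         # leftmost argmax of arr[a..b], inclusive, in O(1)
--         k = (b - a + 1).bit_length() - 1
--         w = 1 << k
--         x = table[k][a]
--         y = table[k][b - w + 1]
--         return x[1] if x[0] >= y[0] else y[1]
--     # A's recursion is a chain with one self-call per step: run it as a loop
--     total = 0
--     while i < j:
--         loc = query(i, j)
--         if loc < bd:
--             if bd > loc + 1:
--                 total += arr[loc] * (bd - loc - 1) - (P[bd] - P[loc + 1])
--             j = loc - 1
--             bd = loc
--         else:
--             if loc > bd + 1: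
--                 total += arr[loc] * (loc - bd - 1) - (P[loc] - P[bd + 1])
--             i = loc + 1
--             bd = loc
--     return total
-- ===== Notes on version B (the rewrite author's own statement) =====
-- stated objective: alternative
-- what changed: B keeps A's max-split decomposition but precomputes prefix sums and a sparse table (range maximum, leftmost tie) once so each step does O(1) work instead of two linear scans, and runs A's self-call chain as an iterative loop instead of recursion.
-- outside the precondition, e.g. on vol(0, 1, [3, 1], -3): A returns 2, B returns 9; on vol(-2, 0, [4, 3], -1): A returns 0, B raises IndexError
import Mathlib
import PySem

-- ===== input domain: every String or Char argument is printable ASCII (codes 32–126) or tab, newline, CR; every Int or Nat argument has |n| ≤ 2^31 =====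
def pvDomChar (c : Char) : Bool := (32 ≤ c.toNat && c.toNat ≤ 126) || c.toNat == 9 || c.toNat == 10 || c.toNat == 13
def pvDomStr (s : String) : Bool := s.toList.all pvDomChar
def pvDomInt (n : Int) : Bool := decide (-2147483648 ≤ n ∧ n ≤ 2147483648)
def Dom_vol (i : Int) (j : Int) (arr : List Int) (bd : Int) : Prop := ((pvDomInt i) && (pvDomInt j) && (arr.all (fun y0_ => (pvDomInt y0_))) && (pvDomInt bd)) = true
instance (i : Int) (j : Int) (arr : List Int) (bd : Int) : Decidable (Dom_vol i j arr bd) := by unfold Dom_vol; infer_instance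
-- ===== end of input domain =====

-- B replaces A's per-call linear scans by a precomputed sparse table (range maximum,
-- leftmost tie) and prefix sums, and runs A's self-call chain as an iterative loop.

-- ===== PORT A =====
-- findmax(i, j, arr): leftmost index of the maximum of arr[i..j] (linear scan)
def findmax (i : Int) (j : Int) (arr : List Int) : Int :=
  ((PySem.List.pyRange i (j+1) 1).foldl
    (fun (s : Int × Int) k =>
      if s.1 < PySem.List.pyGetD arr k 0 then (PySem.List.pyGetD arr k 0, k) else s)
    (PySem.List.pyGetD arr i 0, i)).2

-- the port of A cites this bound for termination
theorem findmax_between (i j : Int) (arr : List Int) (h : i ≤ j) :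
    i ≤ findmax i j arr ∧ findmax i j arr ≤ j := by
  unfold findmax
  have key : ∀ (l : List Int) (st : Int × Int), i ≤ st.2 → st.2 ≤ j →
      (∀ x ∈ l, i ≤ x ∧ x ≤ j) →
      i ≤ (l.foldl (fun (s : Int × Int) k =>
        if s.1 < PySem.List.pyGetD arr k 0 then (PySem.List.pyGetD arr k 0, k) else s) st).2 ∧
      (l.foldl (fun (s : Int × Int) k =>
        if s.1 < PySem.List.pyGetD arr k 0 then (PySem.List.pyGetD arr k 0, k) else s) st).2 ≤ j := by
    intro l
    induction l with
    | nil => intro st h1 h2 _; exact ⟨h1, h2⟩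
    | cons x xs ih =>
      intro st h1 h2 hmem
      simp only [List.foldl_cons]
      by_cases hx : st.1 < PySem.List.pyGetD arr x 0
      · simp only [hx, if_pos]
        exact ih _ (hmem x (by simp)).1 (hmem x (by simp)).2 (fun y hy => hmem y (by simp [hy]))
      · simp only [hx, if_neg, not_false_iff]
        exact ih _ h1 h2 (fun y hy => hmem y (by simp [hy]))
  exact key _ _ le_rfl h (fun x hx => by
    have := (PySem.List.mem_pyRange_one).1 hx; omega)

def vol (i : Int) (j : Int) (arr : List Int) (bd : Int) : Int :=
  if _h : i ≥ j then 0
  else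
    let loc := findmax i j arr
    if loc < bd then
      ((PySem.List.pyRange (loc+1) bd 1).foldl
        (fun t k => t + (PySem.List.pyGetD arr loc 0 - PySem.List.pyGetD arr k 0)) 0)
        + vol i (loc-1) arr loc
    else
      ((PySem.List.pyRange (bd+1) loc 1).foldl
        (fun t k => t + (PySem.List.pyGetD arr loc 0 - PySem.List.pyGetD arr k 0)) 0)
        + vol (loc+1) j arr loc
termination_by (j - i).toNat
decreasing_by
  · have := findmax_between i j arr (by omega)
    omega
  · have := findmax_between i j arr (by omega)
    omega

-- ===== PORT B =====
-- prefix sums P with P[t] = arr[0] + … + arr[t-1]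
def prefixB (arr : List Int) : List Int :=
  arr.foldl (fun p v => p ++ [PySem.List.pyGetD p (-1) 0 + v]) [0]

-- level 0 of the sparse table: (arr[s], s) for each index s
def row0B (arr : List Int) : List (Int × Int) :=
  (PySem.List.pyRange 0 arr.length 1).map (fun s => (PySem.List.pyGetD arr s 0, s))

-- 'while 2*length <= n' loop: each level doubles the window; fuel n bounds the level count
def buildRowsB (n : Nat) (fuel : Nat) (prev : List (Int × Int)) (length : Nat) :
    List (List (Int × Int)) :=
  match fuel with
  | 0 => []
  | fuel + 1 =>
    if 2 * length ≤ n then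
      let row := (PySem.List.pyRange 0 ((n : Int) - 2 * (length : Int) + 1) 1).map
        (fun s =>
          let x := PySem.List.pyGetD prev s (0, 0)
          let y := PySem.List.pyGetD prev (s + (length : Int)) (0, 0)
          if x.1 ≥ y.1 then x else y)
      row :: buildRowsB n fuel row (2 * length)
    else []

def tableB (arr : List Int) : List (List (Int × Int)) :=
  row0B arr :: buildRowsB arr.length arr.length (row0B arr) 1

-- query(a, b): leftmost argmax of arr[a..b] from two overlapping power-of-two windows
def queryB (table : List (List (Int × Int))) (a : Int) (b : Int) : Int :=
  let k := (b - a + 1).toNat.size - 1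
  let w : Int := ((2 ^ k : Nat) : Int)
  let x := PySem.List.pyGetD (table.getD k []) a (0, 0)
  let y := PySem.List.pyGetD (table.getD k []) (b - w + 1) (0, 0)
  if x.1 ≥ y.1 then x.2 else y.2

-- the 'while i < j' loop, with the loop state (i, j, bd, total);
-- fuel (j-i).toNat bounds the iteration count
def solveB (arr : List Int) (P : List Int) (table : List (List (Int × Int)))
    (fuel : Nat) (i : Int) (j : Int) (bd : Int) (total : Int) : Int :=
  match fuel with
  | 0 => total
  | fuel + 1 =>
    if i ≥ j then total
    else
      let loc := queryB table i j
      if loc < bd then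
        solveB arr P table fuel i (loc - 1) loc
          (if bd > loc + 1 then
            total + (PySem.List.pyGetD arr loc 0 * (bd - loc - 1)
              - (PySem.List.pyGetD P bd 0 - PySem.List.pyGetD P (loc + 1) 0))
          else total)
      else
        solveB arr P table fuel (loc + 1) j loc
          (if loc > bd + 1 then
            total + (PySem.List.pyGetD arr loc 0 * (loc - bd - 1)
              - (PySem.List.pyGetD P loc 0 - PySem.List.pyGetD P (bd + 1) 0))
          else total)

def vol_alt (i : Int) (j : Int) (arr : List Int) (bd : Int) : Int :=
  if i ≥ j then 0
  else solveB arr (prefixB arr) (tableB arr) (j - i).toNat i j bd 0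

-- ===== PRECONDITION & SPEC =====
-- Pre_ restricts to the task's natural domain: i, j valid indices and bd in [-1, len].
-- Outside it A either raises IndexError or returns a value produced by Python's
-- negative-index wraparound, which is malformed input for this index-based task.
def Pre_vol (i : Int) (j : Int) (arr : List Int) (bd : Int) : Prop :=
  i ≥ j ∨ (0 ≤ i ∧ j < arr.length ∧ -1 ≤ bd ∧ bd ≤ arr.length)
instance (i : Int) (j : Int) (arr : List Int) (bd : Int) : Decidable (Pre_vol i j arr bd) := by
  unfold Pre_vol; infer_instance

def pvWitness_vol : Int × Int × List Int × Int := (0, 2, [3, 1, 2], -1)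

def Spec_vol (i : Int) (j : Int) (arr : List Int) (bd : Int) (out : Int) : Prop := out = vol_alt i j arr bd
instance (i : Int) (j : Int) (arr : List Int) (bd : Int) (out : Int) : Decidable (Spec_vol i j arr bd out) := by unfold Spec_vol; infer_instance

-- ===== CLAIM (what is proved, stated in full; the proofs are below) =====
def Claim_equal_vol : Prop := ∀ (i : Int) (j : Int) (arr : List Int) (bd : Int), Dom_vol i j arr bd → Pre_vol i j arr bd → Spec_vol i j arr bd (vol i j arr bd)


-- ===== LEMMAS AND PROOFS =====

-- abbreviation for Python's arr[k] (with default), used only in the proofs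
def ga (arr : List Int) (k : Int) : Int := PySem.List.pyGetD arr k 0

-- p is the leftmost position of the maximum of arr[a..b]
def IsLMax (arr : List Int) (a b p : Int) : Prop :=
  a ≤ p ∧ p ≤ b ∧ (∀ k, a ≤ k → k ≤ b → ga arr k ≤ ga arr p) ∧
    (∀ k, a ≤ k → k < p → ga arr k < ga arr p)

theorem isLMax_unique {arr : List Int} {a b p q : Int}
    (hp : IsLMax arr a b p) (hq : IsLMax arr a b q) : p = q := by
  obtain ⟨hp1, hp2, hp3, hp4⟩ := hp
  obtain ⟨hq1, hq2, hq3, hq4⟩ := hq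
  rcases lt_trichotomy p q with h | h | h
  · have h1 := hq4 p hp1 h
    have h2 := hp3 q hq1 hq2
    omega
  · exact h
  · have h1 := hp4 q hq1 h
    have h2 := hq3 p hp1 hp2
    omega

theorem fold_lmax (arr : List Int) (a : Int) (d : Nat) :
    (((PySem.List.pyRange a (a + d + 1) 1).foldl
      (fun (s : Int × Int) k =>
        if s.1 < PySem.List.pyGetD arr k 0 then (PySem.List.pyGetD arr k 0, k) else s)
      (PySem.List.pyGetD arr a 0, a)).1
      = ga arr ((PySem.List.pyRange a (a + d + 1) 1).foldl
      (fun (s : Int × Int) k =>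
        if s.1 < PySem.List.pyGetD arr k 0 then (PySem.List.pyGetD arr k 0, k) else s)
      (PySem.List.pyGetD arr a 0, a)).2)
    ∧ IsLMax arr a (a + d) (((PySem.List.pyRange a (a + d + 1) 1).foldl
      (fun (s : Int × Int) k =>
        if s.1 < PySem.List.pyGetD arr k 0 then (PySem.List.pyGetD arr k 0, k) else s)
      (PySem.List.pyGetD arr a 0, a)).2) := by
  induction d with
  | zero =>
    simp only [Nat.cast_zero, add_zero, PySem.List.pyRange_one_singleton, List.foldl_cons,
      List.foldl_nil, lt_self_iff_false, if_false]
    refine ⟨rfl, le_rfl, le_rfl, fun k h1 h2 => le_of_eq (by rw [show k = a by omega]),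
      fun k h1 h2 => by omega⟩
  | succ d ih =>
    have hsplit : PySem.List.pyRange a (a + (d + 1 : Nat) + 1) 1
        = PySem.List.pyRange a (a + d + 1) 1 ++ [a + d + 1] := by
      have : (a + ((d : Nat) + 1 : Nat) + 1 : Int) = (a + d + 1) + 1 := by push_cast; ring
      rw [this, PySem.List.pyRange_one_succ_right (by omega)]
    rw [hsplit, List.foldl_append]
    obtain ⟨ih1, ih2⟩ := ih
    set st := (PySem.List.pyRange a (a + d + 1) 1).foldl
      (fun (s : Int × Int) k =>
        if s.1 < PySem.List.pyGetD arr k 0 then (PySem.List.pyGetD arr k 0, k) else s)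
      (PySem.List.pyGetD arr a 0, a) with hst
    obtain ⟨hl, hr, hmax, hleft⟩ := ih2
    simp only [List.foldl_cons, List.foldl_nil]
    by_cases hc : st.1 < PySem.List.pyGetD arr (a + d + 1) 0
    · rw [if_pos hc]
      have hcc : ga arr st.2 < ga arr (a + d + 1) := by rw [← ih1]; exact hc
      refine ⟨rfl, by push_cast; omega, by push_cast; omega, ?_, ?_⟩
      · intro k h1 h2
        by_cases hk : k ≤ a + d
        · exact le_of_lt (lt_of_le_of_lt (hmax k h1 hk) hcc)
        · have : k = a + d + 1 := by push_cast at h2 ⊢; omega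
          simp [this]
      · intro k h1 h2
        have hk : k ≤ a + d := by omega
        exact lt_of_le_of_lt (hmax k h1 hk) hcc
    · rw [if_neg hc]
      have hcc : ga arr (a + d + 1) ≤ ga arr st.2 := by rw [← ih1]; exact not_lt.1 hc
      refine ⟨ih1, hl, by push_cast; omega, ?_, hleft⟩
      intro k h1 h2
      by_cases hk : k ≤ a + d
      · exact hmax k h1 hk
      · have : k = a + d + 1 := by push_cast at h2 ⊢; omega
        rw [this]; exact hcc

theorem findmax_spec (arr : List Int) (a b : Int) (h : a ≤ b) :
    IsLMax arr a b (findmax a b arr) := by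
  have hb : b = a + ((b - a).toNat : Int) := by omega
  have := (fold_lmax arr a (b - a).toNat).2
  rw [← hb] at this
  exact this

theorem lMax_combine {arr : List Int} {a e f b p q : Int}
    (hp : IsLMax arr a e p) (hq : IsLMax arr f b q)
    (h1 : a ≤ f) (h2 : f ≤ e + 1) (h3 : e ≤ b) :
    IsLMax arr a b (if ga arr q ≤ ga arr p then p else q) := by
  obtain ⟨hp1, hp2, hp3, hp4⟩ := hp
  obtain ⟨hq1, hq2, hq3, hq4⟩ := hq
  by_cases hc : ga arr q ≤ ga arr p
  · rw [if_pos hc]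
    refine ⟨hp1, by omega, ?_, hp4⟩
    intro k h1 h2
    by_cases hk : k ≤ e
    · exact hp3 k h1 hk
    · exact le_trans (hq3 k (by omega) h2) hc
  · rw [if_neg hc]
    rw [not_le] at hc
    refine ⟨by omega, hq2, ?_, ?_⟩
    · intro k h1 h2
      by_cases hk : k ≤ e
      · exact le_of_lt (lt_of_le_of_lt (hp3 k h1 hk) hc)
      · exact hq3 k (by omega) h2
    · intro k h1 h2
      by_cases hk : k ≤ e
      · exact lt_of_le_of_lt (hp3 k h1 hk) hc
      · exact hq4 k (by omega) h2

-- the pair a sparse-table cell holds for window [a, b]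
def entry (arr : List Int) (a b : Int) : Int × Int :=
  (ga arr (findmax a b arr), findmax a b arr)

theorem entry_eq {arr : List Int} {a b p : Int} (h : a ≤ b) (hp : IsLMax arr a b p) :
    entry arr a b = (ga arr p, p) := by
  have := isLMax_unique (findmax_spec arr a b h) hp
  simp [entry, this]

-- row invariant: cell s of a width-w row is the entry for window [s, s+w-1]
def RowOK (arr : List Int) (w : Nat) (row : List (Int × Int)) : Prop :=
  ∀ s : Int, 0 ≤ s → s + w ≤ arr.length →
    PySem.List.pyGetD row s (0, 0) = entry arr s (s + w - 1)

theorem row0_ok (arr : List Int) : RowOK arr 1 (row0B arr) := by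
  intro s hs hsw
  unfold row0B
  rw [PySem.List.pyGetD_map_pyRange_of_nonneg _ _ _ _ hs (by push_cast at hsw ⊢; omega)]
  have hself : IsLMax arr s s s :=
    ⟨le_rfl, le_rfl, fun k h1 h2 => le_of_eq (by rw [show k = s by omega]),
      fun k h1 h2 => by omega⟩
  have := entry_eq (le_refl s) hself
  simp only [Nat.cast_one]
  rw [show s + 1 - 1 = s by ring, this]
  rfl

theorem buildRow_ok (arr : List Int) (w : Nat) (hw : 1 ≤ w) (prev : List (Int × Int))
    (h : RowOK arr w prev) :
    RowOK arr (2 * w) ((PySem.List.pyRange 0 ((arr.length : Int) - 2 * (w : Int) + 1) 1).map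
      (fun s =>
        let x := PySem.List.pyGetD prev s (0, 0)
        let y := PySem.List.pyGetD prev (s + (w : Int)) (0, 0)
        if x.1 ≥ y.1 then x else y)) := by
  intro s hs hsw
  have hn : s < (arr.length : Int) - 2 * (w : Int) + 1 := by push_cast at hsw ⊢; omega
  rw [PySem.List.pyGetD_map_pyRange_of_nonneg _ _ _ _ hs hn]
  simp only
  rw [h s hs (by push_cast at hsw ⊢; omega), h (s + w) (by omega) (by push_cast at hsw ⊢; omega)]
  have hp := findmax_spec arr s (s + w - 1) (by omega)
  have hq := findmax_spec arr (s + w) (s + w + w - 1) (by omega)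
  have hcomb := lMax_combine hp hq (by omega) (by omega) (by omega)
  have hent := entry_eq (show s ≤ s + w + w - 1 by omega) hcomb
  rw [show s + ((2 * w : Nat) : Int) - 1 = s + (w : Int) + (w : Int) - 1 by push_cast; ring,
    hent]
  simp only [entry, ge_iff_le]
  split_ifs with hc
  · rfl
  · rfl

theorem buildRows_ok (arr : List Int) (fuel : Nat) :
    ∀ (prev : List (Int × Int)) (w : Nat), 1 ≤ w → RowOK arr w prev →
    ∀ t : Nat, t < fuel → 2 ^ (t + 1) * w ≤ arr.length →
    RowOK arr (2 ^ (t + 1) * w) ((buildRowsB arr.length fuel prev w).getD t []) := by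
  induction fuel with
  | zero => intro prev w hw hprev t ht hle; omega
  | succ fuel ih =>
    intro prev w hw hprev t ht hle
    have h2w : 2 * w ≤ arr.length := by
      have h1 : 2 * w ≤ 2 ^ (t + 1) * w := by
        have : 2 ≤ 2 ^ (t + 1) := by
          calc 2 = 2 ^ 1 := (pow_one 2).symm
          _ ≤ 2 ^ (t + 1) := Nat.pow_le_pow_right (by omega) (by omega)
        exact Nat.mul_le_mul_right w this
      omega
    unfold buildRowsB
    rw [if_pos h2w]
    have hrow := buildRow_ok arr w hw prev hprev
    cases t with
    | zero =>
      simpa [pow_one] using hrow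
    | succ t =>
      simp only [List.getD_cons_succ]
      have := ih _ (2 * w) (by omega) hrow t (by omega)
        (by rw [show 2 ^ (t + 1) * (2 * w) = 2 ^ (t + 1 + 1) * w by ring]; exact hle)
      rw [show 2 ^ (t + 1) * (2 * w) = 2 ^ (t + 1 + 1) * w by ring] at this
      exact this

theorem table_ok (arr : List Int) (k : Nat) (hk : 2 ^ k ≤ arr.length) :
    RowOK arr (2 ^ k) ((tableB arr).getD k []) := by
  cases k with
  | zero => simpa [tableB, pow_zero] using row0_ok arr
  | succ k =>
    have hkn : k < arr.length := by
      have h1 : k + 1 < 2 ^ (k + 1) := Nat.lt_two_pow_self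
      omega
    have := buildRows_ok arr arr.length (row0B arr) 1 le_rfl (row0_ok arr) k hkn
      (by rw [mul_one]; exact hk)
    rw [mul_one] at this
    simpa [tableB] using this

theorem query_eq (arr : List Int) (a b : Int) (h0 : 0 ≤ a) (hab : a ≤ b)
    (hb : b < arr.length) : queryB (tableB arr) a b = findmax a b arr := by
  simp only [queryB]
  set len := (b - a + 1).toNat with hlendef
  set k := len.size - 1 with hkdef
  have hlen1 : 1 ≤ len := by omega
  have hsz : 0 < len.size := Nat.size_pos.mpr hlen1
  have hk2 : 2 ^ k ≤ len := by
    rw [← Nat.lt_size]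
    omega
  have hk3 : len < 2 ^ (k + 1) := by
    have h1 := Nat.lt_size_self len
    have h2 : k + 1 = len.size := by omega
    rw [h2]
    exact h1
  have hpow : 2 ^ (k + 1) = 2 * 2 ^ k := by ring
  have hw1 : 1 ≤ 2 ^ k := Nat.one_le_two_pow
  have h2kn : 2 ^ k ≤ arr.length := by omega
  have hrow := table_ok arr k h2kn
  have hx := hrow a h0 (by omega)
  have hy := hrow (b - ((2 ^ k : Nat) : Int) + 1) (by omega) (by omega)
  rw [show b - ((2 ^ k : Nat) : Int) + 1 + ((2 ^ k : Nat) : Int) - 1 = b by ring] at hy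
  rw [hx, hy]
  have hp := findmax_spec arr a (a + ((2 ^ k : Nat) : Int) - 1) (by omega)
  have hq := findmax_spec arr (b - ((2 ^ k : Nat) : Int) + 1) b (by omega)
  have hcomb := lMax_combine hp hq (by omega) (by omega) (by omega)
  have hfin := isLMax_unique hcomb (findmax_spec arr a b hab)
  rw [← hfin]
  simp only [entry, ge_iff_le]

theorem prefixB_eq (arr : List Int) :
    prefixB arr = (List.range (arr.length + 1)).map (fun t => ((arr.take t).sum : Int)) := by
  induction arr using List.reverseRecOn with
  | nil => simp [prefixB]
  | append_singleton as a ih =>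
    unfold prefixB at ih ⊢
    rw [List.foldl_append, ih, List.foldl_cons, List.foldl_nil]
    have hlast : PySem.List.pyGetD
        ((List.range (as.length + 1)).map (fun t => ((as.take t).sum : Int))) (-1) 0
        = as.sum := by
      rw [List.range_succ, List.map_append, List.map_cons, List.map_nil,
        PySem.List.pyGetD_neg_one_append_singleton, List.take_length]
    rw [hlast]
    have hlen : (as ++ [a]).length + 1 = (as.length + 1) + 1 := by simp
    have hmap : (List.range (as.length + 1)).map (fun t => (((as ++ [a]).take t).sum : Int))
        = (List.range (as.length + 1)).map (fun t => ((as.take t).sum : Int)) := by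
      apply List.map_congr_left
      intro t ht
      rw [List.mem_range] at ht
      rw [List.take_append_of_le_length (by omega)]
    have hg : (((as ++ [a]).take (as.length + 1)).sum : Int) = as.sum + a := by
      rw [show as.length + 1 = (as ++ [a]).length by simp, List.take_length]
      simp
    conv_rhs => rw [hlen, List.range_succ, List.map_append, List.map_cons, List.map_nil,
      hmap, hg]

theorem prefix_getD (arr : List Int) (t : Int) (h0 : 0 ≤ t) (h1 : t ≤ arr.length) :
    PySem.List.pyGetD (prefixB arr) t 0 = (arr.take t.toNat).sum := by
  rw [prefixB_eq]
  rw [PySem.List.pyGetD_eq_getElem _ 0 (by omega) (by simp; omega)]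
  simp only [List.getElem_map, List.getElem_range]

theorem sumloop (arr : List Int) (c : Int) (d : Nat) :
    ∀ (a : Int), 0 ≤ a → a + d ≤ arr.length →
    (PySem.List.pyRange a (a + d) 1).foldl
      (fun t k => t + (c - PySem.List.pyGetD arr k 0)) 0
      = c * d - ((arr.take (a + d).toNat).sum - (arr.take a.toNat).sum) := by
  induction d with
  | zero =>
    intro a h0 hn
    rw [show (a + ((0 : Nat) : Int)) = a by push_cast; ring]
    rw [PySem.List.pyRange_one_eq_nil le_rfl]
    simp
  | succ d ih =>
    intro a h0 hn
    have hstep : (a + ((d + 1 : Nat) : Int)) = (a + d) + 1 := by push_cast; ring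
    rw [hstep, PySem.List.pyRange_one_succ_right (by omega), List.foldl_append,
      List.foldl_cons, List.foldl_nil]
    rw [ih a h0 (by push_cast at hn ⊢; omega)]
    have hidx := PySem.List.pyGetD_eq_getElem arr 0 (show (0 : Int) ≤ a + d by omega)
      (show a + d < (arr.length : Int) by push_cast at hn ⊢; omega)
    have htake : (arr.take ((a + d) + 1).toNat).sum
        = (arr.take (a + d).toNat).sum + arr[(a + d).toNat] := by
      rw [show ((a + d) + 1).toNat = (a + d).toNat + 1 by omega]
      exact List.sum_take_succ arr (a + d).toNat (by push_cast at hn ⊢; omega)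
    rw [hidx, ← hstep] at *
    rw [show ((a + ((d + 1 : Nat) : Int))).toNat = ((a + d) + 1).toNat by push_cast; omega]
      at *
    rw [htake]
    push_cast
    ring

theorem solve_eq (arr : List Int) (fuel : Nat) :
    ∀ (i j bd total : Int), (j - i).toNat ≤ fuel → 0 ≤ i → j < arr.length →
    -1 ≤ bd → bd ≤ arr.length →
    solveB arr (prefixB arr) (tableB arr) fuel i j bd total = total + vol i j arr bd := by
  induction fuel with
  | zero =>
    intro i j bd total hf h0 hj hb1 hb2
    have hij : i ≥ j := by omega
    rw [vol]
    simp [solveB, hij]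
  | succ fuel ih =>
    intro i j bd total hf h0 hj hb1 hb2
    rw [vol]
    by_cases hij : i ≥ j
    · simp [solveB, hij]
    · rw [dif_neg hij]
      simp only [solveB, if_neg hij]
      have hq := query_eq arr i j h0 (by omega) hj
      rw [hq]
      obtain ⟨hl1, hl2, hmax, hleft⟩ := findmax_spec arr i j (by omega)
      set loc := findmax i j arr with hloc
      by_cases hlb : loc < bd
      · rw [if_pos hlb, if_pos hlb]
        rw [ih i (loc - 1) loc _ (by omega) h0 (by omega) (by omega) (by omega)]
        have hs := sumloop arr (PySem.List.pyGetD arr loc 0) (bd - loc - 1).toNat (loc + 1)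
          (by omega) (by omega)
        rw [show (loc + 1) + (((bd - loc - 1).toNat : Nat) : Int) = bd by omega] at hs
        by_cases hgt : bd > loc + 1
        · rw [if_pos hgt, hs, prefix_getD arr bd (by omega) (by omega),
            prefix_getD arr (loc + 1) (by omega) (by omega),
            show ((((bd - loc - 1).toNat : Nat)) : Int) = bd - loc - 1 by omega]
          ring
        · rw [if_neg hgt]
          have hbd : bd = loc + 1 := by omega
          subst hbd
          rw [PySem.List.pyRange_one_eq_nil le_rfl]
          simp
      · rw [if_neg hlb, if_neg hlb]
        rw [ih (loc + 1) j loc _ (by omega) (by omega) hj (by omega) (by omega)]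
        by_cases hgt : loc > bd + 1
        · have hs := sumloop arr (PySem.List.pyGetD arr loc 0) (loc - bd - 1).toNat (bd + 1)
            (by omega) (by omega)
          rw [show (bd + 1) + (((loc - bd - 1).toNat : Nat) : Int) = loc by omega] at hs
          rw [if_pos hgt, hs, prefix_getD arr loc (by omega) (by omega),
            prefix_getD arr (bd + 1) (by omega) (by omega),
            show ((((loc - bd - 1).toNat : Nat)) : Int) = loc - bd - 1 by omega]
          ring
        · rw [if_neg hgt]
          rw [PySem.List.pyRange_one_eq_nil (by omega)]
          simp

-- ===== VERDICT (by name: the statement is the Claim_ definition above) =====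
theorem vol_spec : Claim_equal_vol := by
  intro i j arr bd _ hpre
  unfold Spec_vol
  by_cases hij : i ≥ j
  · rw [vol]
    simp [vol_alt, hij]
  · rcases hpre with h | ⟨h0, hj, hb1, hb2⟩
    · omega
    · unfold vol_alt
      rw [if_neg hij]
      rw [solve_eq arr (j - i).toNat i j bd 0 le_rfl h0 hj hb1 hb2]
      ring
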